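-- pv_equiv track=rewrite | github.com/matbme/coalitions | splittings.py | calculate_nss
-- ===== SOURCE A (Python) =====
-- from math import factorial, ceil
--
-- def possible_subsets(n: int, s: int) -> int:
--     return factorial(n) // (factorial(n - s) * factorial(s))
--
-- def calculate_nss(s: int) -> int:
--     result = 0
--     for spp in range(ceil(s / 2), s):
--         if (s - spp) == spp:
--             result += possible_subsets(s, spp) // 2
--         else:
--             result += possible_subsets(s, spp)
--
--     return result
-- ===== SOURCE B (Python) =====
-- def calculate_nss(s: int) -> int:
--     # Number of unordered splittings of s members into two nonempty parts:
--     # (2^s - 2) / 2 = 2^(s-1) - 1 for s >= 1, else 0.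
--     return (1 << (s - 1)) - 1 if s > 0 else 0
-- ===== Notes on version B (the rewrite author's own statement) =====
-- stated objective: faster
-- what changed: Replaced the half-range loop over binomial coefficients (computed via factorials) with the closed form 2^(s-1)-1 via a bit shift, with 0 for s <= 0.
import Mathlib
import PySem

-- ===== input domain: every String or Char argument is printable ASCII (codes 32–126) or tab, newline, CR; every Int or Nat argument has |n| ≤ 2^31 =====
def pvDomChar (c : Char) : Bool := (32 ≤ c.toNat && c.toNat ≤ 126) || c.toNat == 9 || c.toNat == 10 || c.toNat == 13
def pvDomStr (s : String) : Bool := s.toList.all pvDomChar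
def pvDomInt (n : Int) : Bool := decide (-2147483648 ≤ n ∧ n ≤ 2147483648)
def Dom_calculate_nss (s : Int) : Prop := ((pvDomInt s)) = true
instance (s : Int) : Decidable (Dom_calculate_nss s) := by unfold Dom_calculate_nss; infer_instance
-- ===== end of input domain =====

-- B replaces A's loop of factorial-based binomial coefficients by the closed form 2^(s-1) - 1 (0 for s ≤ 0): asymptotically faster.

-- ===== PORT A =====
-- math.factorial; only ever called with nonnegative arguments by A (the loop is empty when s ≤ 0)
def pvFact (n : Int) : Int := ((Nat.factorial n.toNat : Nat) : Int)

def possible_subsets (n : Int) (s : Int) : Int :=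
  PySem.Int.floordiv (pvFact n) (pvFact (n - s) * pvFact s)

-- math.ceil(s / 2): for |s| ≤ 2^31 the float s/2 is exact, so ceil(s/2) = -((-s) // 2); exact on Dom
def calculate_nss (s : Int) : Int :=
  (PySem.List.pyRange (-(PySem.Int.floordiv (-s) 2)) s 1).foldl
    (fun result spp =>
      if s - spp = spp then result + PySem.Int.floordiv (possible_subsets s spp) 2
      else result + possible_subsets s spp) 0

-- ===== PORT B =====
def calculate_nss_alt (s : Int) : Int :=
  if 0 < s then 2 ^ (s - 1).toNat - 1 else 0

-- ===== PRECONDITION & SPEC =====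
def Spec_calculate_nss (s : Int) (out : Int) : Prop := out = calculate_nss_alt s
instance (s : Int) (out : Int) : Decidable (Spec_calculate_nss s out) := by unfold Spec_calculate_nss; infer_instance

-- ===== CLAIM (what is proved, stated in full; the proofs are below) =====
def Claim_equal_calculate_nss : Prop := ∀ (s : Int), Dom_calculate_nss s → Spec_calculate_nss s (calculate_nss s)

-- ===== LEMMAS AND PROOFS =====

-- A's sum, expressed over ℕ
def natSum (n : ℕ) : ℕ :=
  ∑ k ∈ Finset.Ico ((n + 1) / 2) n, (if n - k = k then n.choose k / 2 else n.choose k)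

lemma pvFact_natCast (n : ℕ) : pvFact (n : Int) = (Nat.factorial n : Int) := by
  simp [pvFact]

lemma possible_subsets_eq (n k : ℕ) (h : k ≤ n) :
    possible_subsets (n : Int) (k : Int) = (n.choose k : Int) := by
  unfold possible_subsets
  have h1 : (n : Int) - (k : Int) = ((n - k : ℕ) : Int) := by omega
  rw [h1, pvFact_natCast, pvFact_natCast, pvFact_natCast]
  have hpos : (0 : Int) < ((n - k).factorial : Int) * (k.factorial : Int) := by
    positivity
  rw [PySem.Int.floordiv_eq_ediv_of_pos hpos]
  have hfac : (n.factorial : Int) = (n.choose k : Int) * (((n - k).factorial : Int) * (k.factorial : Int)) := by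
    have := Nat.choose_mul_factorial_mul_factorial h
    push_cast [← this]
    ring
  rw [hfac, Int.mul_ediv_cancel _ (ne_of_gt hpos)]

lemma central_choose_even (m : ℕ) (hm : 1 ≤ m) : 2 ∣ (2 * m).choose m := by
  obtain ⟨a, ha⟩ : ∃ a, m = a + 1 := ⟨m - 1, by omega⟩
  subst ha
  have h1 : 2 * (a + 1) = (2 * a + 1) + 1 := by ring
  rw [h1, Nat.choose_succ_succ]
  have h3 : (2 * a + 1).choose (a + 1) = (2 * a + 1).choose a := by
    have hk : a + 1 ≤ 2 * a + 1 := by omega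
    have := Nat.choose_symm hk
    simpa [show 2 * a + 1 - (a + 1) = a by omega] using this.symm
  rw [h3]
  exact ⟨(2 * a + 1).choose a, (two_mul _).symm⟩

lemma natSum_eq (n : ℕ) (hn : 1 ≤ n) : natSum n = 2 ^ (n - 1) - 1 := by
  rcases Nat.even_or_odd n with ⟨m, hm⟩ | ⟨m, hm⟩
  · -- even: n = m + m, m ≥ 1
    have hm2 : n = 2 * m := by omega
    subst hm2
    have hm1 : 1 ≤ m := by omega
    have htot : ∑ k ∈ Finset.range (2 * m + 1), (2 * m).choose k = 2 ^ (2 * m) :=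
      Nat.sum_range_choose (2 * m)
    -- split the total at m and m+1
    have hsplit : ∑ k ∈ Finset.range (2 * m + 1), (2 * m).choose k
        = (∑ k ∈ Finset.range m, (2 * m).choose k) + ((2 * m).choose m
          + ∑ k ∈ Finset.Ico (m + 1) (2 * m + 1), (2 * m).choose k) := by
      rw [Finset.range_eq_Ico, ← Finset.sum_Ico_consecutive _ (Nat.zero_le m) (by omega : m ≤ 2 * m + 1),
        Finset.sum_eq_sum_Ico_succ_bot (by omega : m < 2 * m + 1), ← Finset.range_eq_Ico]
    -- reflection: upper block equals lower block
    have hrefl : ∑ k ∈ Finset.Ico (m + 1) (2 * m + 1), (2 * m).choose k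
        = ∑ k ∈ Finset.range m, (2 * m).choose k := by
      rw [Finset.sum_Ico_eq_sum_range]
      have hidx : ∀ j ∈ Finset.range (2 * m + 1 - (m + 1)), (2 * m).choose (m + 1 + j)
          = (2 * m).choose (m - 1 - j) := by
        intro j hj
        rw [Finset.mem_range] at hj
        have hk : m + 1 + j ≤ 2 * m := by omega
        have := Nat.choose_symm hk
        rw [show 2 * m - (m + 1 + j) = m - 1 - j by omega] at this
        exact this.symm
      rw [Finset.sum_congr rfl hidx, show 2 * m + 1 - (m + 1) = m by omega]
      exact Finset.sum_range_reflect (fun j => (2 * m).choose j) m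
    -- the upper block minus its top term
    have htop : ∑ k ∈ Finset.Ico (m + 1) (2 * m + 1), (2 * m).choose k
        = (∑ k ∈ Finset.Ico (m + 1) (2 * m), (2 * m).choose k) + 1 := by
      rw [Finset.sum_Ico_succ_top (by omega : m + 1 ≤ 2 * m), Nat.choose_self]
    -- natSum in terms of the blocks
    have hns : natSum (2 * m) = (2 * m).choose m / 2
        + ∑ k ∈ Finset.Ico (m + 1) (2 * m), (2 * m).choose k := by
      unfold natSum
      rw [show (2 * m + 1) / 2 = m by omega,
        Finset.sum_eq_sum_Ico_succ_bot (by omega : m < 2 * m),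
        if_pos (by omega : 2 * m - m = m)]
      congr 1
      refine Finset.sum_congr rfl ?_
      intro k hk
      rw [Finset.mem_Ico] at hk
      rw [if_neg (by omega)]
    obtain ⟨c, hc⟩ := central_choose_even m hm1
    have hpow : 2 ^ (2 * m) = 2 * 2 ^ (2 * m - 1) := by
      rw [← pow_succ']
      congr 1
      omega
    rw [htot, hsplit] at *
    omega
  · -- odd: n = 2 * m + 1
    subst hm
    have htot : ∑ k ∈ Finset.range (2 * m + 2), (2 * m + 1).choose k = 2 ^ (2 * m + 1) :=
      Nat.sum_range_choose (2 * m + 1)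
    have hhalf : ∑ k ∈ Finset.range (m + 1), (2 * m + 1).choose k = 4 ^ m :=
      Nat.sum_range_choose_halfway m
    have hsplit : ∑ k ∈ Finset.range (2 * m + 2), (2 * m + 1).choose k
        = (∑ k ∈ Finset.range (m + 1), (2 * m + 1).choose k)
          + ∑ k ∈ Finset.Ico (m + 1) (2 * m + 2), (2 * m + 1).choose k := by
      rw [Finset.range_eq_Ico, ← Finset.sum_Ico_consecutive _ (Nat.zero_le (m + 1))
        (by omega : m + 1 ≤ 2 * m + 2), ← Finset.range_eq_Ico]
    have htop : ∑ k ∈ Finset.Ico (m + 1) (2 * m + 2), (2 * m + 1).choose k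
        = (∑ k ∈ Finset.Ico (m + 1) (2 * m + 1), (2 * m + 1).choose k) + 1 := by
      rw [Finset.sum_Ico_succ_top (by omega : m + 1 ≤ 2 * m + 1), Nat.choose_self]
    have hns : natSum (2 * m + 1)
        = ∑ k ∈ Finset.Ico (m + 1) (2 * m + 1), (2 * m + 1).choose k := by
      unfold natSum
      rw [show (2 * m + 1 + 1) / 2 = m + 1 by omega]
      refine Finset.sum_congr rfl ?_
      intro k hk
      rw [Finset.mem_Ico] at hk
      rw [if_neg (by omega)]
    have hpow : 2 ^ (2 * m + 1) = 2 * 2 ^ (2 * m) := by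
      rw [pow_succ']
    have h4 : (4 : ℕ) ^ m = 2 ^ (2 * m) := by
      rw [show (4 : ℕ) = 2 ^ 2 by norm_num, ← pow_mul]
    rw [show 2 * m + 1 - 1 = 2 * m by omega]
    omega

lemma list_range_sum_cast (m : ℕ) (f : ℕ → ℕ) :
    ((List.range m).map (fun k => ((f k : ℕ) : Int))).sum
      = ((∑ k ∈ Finset.range m, f k : ℕ) : Int) := by
  induction m with
  | zero => simp
  | succ m ih => simp [List.range_succ, Finset.sum_range_succ, ih]

theorem calculate_nss_eq (s : Int) : calculate_nss s = calculate_nss_alt s := by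
  unfold calculate_nss calculate_nss_alt
  by_cases hs : 0 < s
  · rw [if_pos hs]
    obtain ⟨n, hn⟩ : ∃ n : ℕ, s = (n : Int) := ⟨s.toNat, by omega⟩
    subst hn
    have hn1 : 1 ≤ n := by exact_mod_cast hs
    have hc : -(PySem.Int.floordiv (-(n : Int)) 2) = (((n + 1) / 2 : ℕ) : Int) := by
      rw [PySem.Int.floordiv_eq_ediv_of_pos (by norm_num : (0 : Int) < 2)]
      omega
    have hfun : (fun (result spp : Int) =>
        if (n : Int) - spp = spp then result + PySem.Int.floordiv (possible_subsets (n : Int) spp) 2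
        else result + possible_subsets (n : Int) spp)
        = fun (result spp : Int) => result +
          (if (n : Int) - spp = spp then PySem.Int.floordiv (possible_subsets (n : Int) spp) 2
           else possible_subsets (n : Int) spp) := by
      funext a b
      split <;> rfl
    rw [hc, hfun, PySem.List.foldl_add, zero_add, PySem.List.pyRange_one, List.map_map]
    have hlen : ((n : Int) - (((n + 1) / 2 : ℕ) : Int)).toNat = n - (n + 1) / 2 := by omega
    rw [hlen]
    have hterm : ∀ k ∈ List.range (n - (n + 1) / 2),
        ((fun spp => if (n : Int) - spp = spp
            then PySem.Int.floordiv (possible_subsets (n : Int) spp) 2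
            else possible_subsets (n : Int) spp) ∘ fun k => (((n + 1) / 2 : ℕ) : Int) + ↑k) k
        = ((if n - ((n + 1) / 2 + k) = (n + 1) / 2 + k
            then n.choose ((n + 1) / 2 + k) / 2
            else n.choose ((n + 1) / 2 + k) : ℕ) : Int) := by
      intro k hk
      rw [List.mem_range] at hk
      have hj : (n + 1) / 2 + k ≤ n := by omega
      have hcast : (((n + 1) / 2 : ℕ) : Int) + (k : Int) = (((n + 1) / 2 + k : ℕ) : Int) := by
        push_cast
        ring
      simp only [Function.comp_apply, hcast]
      by_cases hcond : n - ((n + 1) / 2 + k) = (n + 1) / 2 + k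
      · rw [if_pos hcond, if_pos (by omega), possible_subsets_eq n _ hj]
        exact_mod_cast PySem.Int.floordiv_natCast (n.choose ((n + 1) / 2 + k)) 2
      · rw [if_neg hcond, if_neg (by omega), possible_subsets_eq n _ hj]
    rw [List.map_congr_left hterm, list_range_sum_cast,
      ← Finset.sum_Ico_eq_sum_range (fun j => if n - j = j then n.choose j / 2 else n.choose j)]
    have : (∑ k ∈ Finset.Ico ((n + 1) / 2) n, (if n - k = k then n.choose k / 2 else n.choose k))
        = natSum n := rfl
    rw [this, natSum_eq n hn1]
    have hpow : 1 ≤ 2 ^ (n - 1) := Nat.one_le_two_pow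
    have htn : ((n : Int) - 1).toNat = n - 1 := by omega
    rw [htn]
    push_cast [Nat.cast_sub hpow]
    rfl
  · have hnil : s ≤ -(PySem.Int.floordiv (-s) 2) := by
      rw [PySem.Int.floordiv_eq_ediv_of_pos (by norm_num : (0 : Int) < 2)]
      omega
    rw [if_neg hs, PySem.List.pyRange_one_eq_nil hnil]
    rfl

-- ===== VERDICT (by name: the statement is the Claim_ definition above) =====
theorem calculate_nss_spec : Claim_equal_calculate_nss := by
  intro s _
  exact calculate_nss_eq s
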